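-- pv_equiv track=rewrite | github.com/FoulSpark/Advanced-MCP-Server-for-Intelligent-Code-Completion | advanced_mcp_server.py | _detect_ai_context_level
-- ===== SOURCE A (Python) =====
-- from typing import List, Dict, Any, Optional
--
-- def _detect_ai_context_level(lines: List[str], cursor_context: str) -> str:
--     """Detect the context level for AI completion (function, class, module)"""
--     # Look for the most recent function or class definition
--     for i in range(len(lines) - 1, -1, -1):
--         line = lines[i].strip()
--
--         # Skip empty lines and comments
--         if not line or line.startswith('#'):
--             continue
--
--         # Check if we're inside a class
--         if line.startswith('class '):
--             class_name = line.split()[1].split('(')[0].split(':')[0]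
--             return f"inside class '{class_name}'"
--
--         # Check if we're inside a function
--         elif line.startswith('def '):
--             func_name = line.split()[1].split('(')[0]
--             return f"inside function '{func_name}'"
--
--         # Check if we're inside a control structure
--         elif any(line.startswith(keyword) for keyword in ['if ', 'elif ', 'else:', 'for ', 'while ', 'try:', 'except', 'finally:', 'with ']):
--             return f"inside control structure '{line.split(':')[0].strip()}'"
--
--     return "module level"
-- ===== SOURCE B (Python) =====
-- # One forward pass records (kind, line) of the last keyword-classifiable line via a
-- # prefix table; a separate rendering phase extracts the name/header by char scans
-- # (no split()/split chains, no backward index loop).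
--
-- _PREFIX_TABLE = [
--     ('class ', 'class'), ('def ', 'def'),
--     ('if ', 'ctrl'), ('elif ', 'ctrl'), ('else:', 'ctrl'), ('for ', 'ctrl'),
--     ('while ', 'ctrl'), ('try:', 'ctrl'), ('except', 'ctrl'),
--     ('finally:', 'ctrl'), ('with ', 'ctrl'),
-- ]
--
--
-- def _kind_of(s):
--     for prefix, kind in _PREFIX_TABLE:
--         if s.startswith(prefix):
--             return kind
--     return None
--
--
-- def _word_after(s, n, stops):
--     """First whitespace-delimited word of s[n:], cut at any char in stops."""
--     rest = s[n:].lstrip()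
--     out = []
--     for c in rest:
--         if c.isspace() or c in stops:
--             break
--         out.append(c)
--     return ''.join(out)
--
--
-- def _header(s):
--     """Chars of s before the first ':', stripped."""
--     out = []
--     for c in s:
--         if c == ':':
--             break
--         out.append(c)
--     return ''.join(out).strip()
--
--
-- def _render(found):
--     if found is None:
--         return "module level"
--     kind, s = found
--     if kind == 'class':
--         return "inside class '%s'" % _word_after(s, 6, '(:')
--     if kind == 'def':
--         return "inside function '%s'" % _word_after(s, 4, '(')
--     return "inside control structure '%s'" % _header(s)
--
--
-- def _detect_ai_context_level(lines, cursor_context):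
--     found = None
--     for raw in lines:
--         s = raw.strip()
--         kind = _kind_of(s)
--         if kind is not None:
--             found = (kind, s)
--     return _render(found)
-- ===== Notes on version B (the rewrite author's own statement) =====
-- stated objective: alternative
-- what changed: A scans backwards with an index loop, early-returning the first classifiable line and extracting names via split()/split-chain string methods; B makes one forward pass that only records (kind, line) of the last line matching a prefix table, then a separate rendering phase extracts the class/function name and control header by direct character scans (lstrip + take-until-stop-char) instead of split chains.
import Mathlib
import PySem

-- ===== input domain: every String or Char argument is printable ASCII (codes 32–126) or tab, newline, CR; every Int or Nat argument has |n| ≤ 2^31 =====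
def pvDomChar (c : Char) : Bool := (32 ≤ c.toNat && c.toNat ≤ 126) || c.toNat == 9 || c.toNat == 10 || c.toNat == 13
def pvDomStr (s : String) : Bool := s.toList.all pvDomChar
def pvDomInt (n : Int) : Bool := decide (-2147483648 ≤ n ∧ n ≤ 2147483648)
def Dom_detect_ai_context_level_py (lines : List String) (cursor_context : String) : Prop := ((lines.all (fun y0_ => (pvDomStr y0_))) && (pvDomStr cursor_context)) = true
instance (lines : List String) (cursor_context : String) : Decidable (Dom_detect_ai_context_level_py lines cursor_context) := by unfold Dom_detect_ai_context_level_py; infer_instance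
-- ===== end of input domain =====

-- B replaces A's backward early-return scan + split()-chain extraction by a forward pass that
-- records the last prefix-table-classifiable line, then a separate rendering phase that extracts
-- names by direct character scans (objective: alternative decomposition).

-- ===== PORT A =====
-- A's backward loop `for i in range(len(lines)-1, -1, -1)` with early returns, as structural
-- recursion over `lines.reverse`.  The list indexings `split()[1]` / `[0]` are ported with
-- `getD ""`; they are unreachable defaults, since the branch guard guarantees the token exists.
def detect_ai_context_level_py_go : List String → String
  | [] => "module level"
  | l :: rest =>
    let line := PySem.Str.strip l
    if line == "" || PySem.Str.startswith line "#" then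
      detect_ai_context_level_py_go rest
    else if PySem.Str.startswith line "class " then
      let class_name :=
        (((PySem.Str.split? (((PySem.Str.split? ((PySem.Str.split₀ line).getD 1 "") "(").getD []).getD 0 "") ":").getD []).getD 0 "")
      "inside class '" ++ class_name ++ "'"
    else if PySem.Str.startswith line "def " then
      let func_name :=
        (((PySem.Str.split? ((PySem.Str.split₀ line).getD 1 "") "(").getD []).getD 0 "")
      "inside function '" ++ func_name ++ "'"
    else if ["if ", "elif ", "else:", "for ", "while ", "try:", "except", "finally:", "with "].any
        (fun keyword => PySem.Str.startswith line keyword) then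
      "inside control structure '" ++ PySem.Str.strip (((PySem.Str.split? line ":").getD []).getD 0 "") ++ "'"
    else
      detect_ai_context_level_py_go rest

def detect_ai_context_level_py (lines : List String) (cursor_context : String) : String :=
  detect_ai_context_level_py_go lines.reverse

-- ===== PORT B =====
-- Source B's prefix table _PREFIX_TABLE
def pvPrefixTable : List (String × String) :=
  [("class ", "class"), ("def ", "def"),
   ("if ", "ctrl"), ("elif ", "ctrl"), ("else:", "ctrl"), ("for ", "ctrl"),
   ("while ", "ctrl"), ("try:", "ctrl"), ("except", "ctrl"),
   ("finally:", "ctrl"), ("with ", "ctrl")]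

-- Source B's _kind_of: first matching table entry's kind (the for/return loop is List.find?)
def detect_kind_of (s : String) : Option String :=
  (pvPrefixTable.find? (fun p => PySem.Str.startswith s p.1)).map (·.2)

-- Source B's _word_after: s[n:] with n ≥ 0 is List.drop n on code points (exact);
-- .lstrip() is dropWhile isspace; the for/break loop is takeWhile.
def detect_word_after (s : String) (n : Nat) (stops : List Char) : String :=
  String.ofList (((s.toList.drop n).dropWhile PySem.Chars.isspace).takeWhile
    (fun c => !(PySem.Chars.isspace c || stops.contains c)))

-- Source B's _header: the for/break loop is takeWhile, then .strip()
def detect_header (s : String) : String :=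
  PySem.Str.strip (String.ofList (s.toList.takeWhile (fun c => !(c == ':'))))

-- Source B's _render
def detect_render : Option (String × String) → String
  | none => "module level"
  | some (kind, s) =>
    if kind == "class" then "inside class '" ++ detect_word_after s 6 ['(', ':'] ++ "'"
    else if kind == "def" then "inside function '" ++ detect_word_after s 4 ['('] ++ "'"
    else "inside control structure '" ++ detect_header s ++ "'"

def detect_ai_context_level_py_alt (lines : List String) (cursor_context : String) : String :=
  detect_render (lines.foldl (fun found raw =>
    let s := PySem.Str.strip raw
    match detect_kind_of s with
    | some kind => some (kind, s)
    | none => found) none)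

-- ===== PRECONDITION & SPEC =====
def Spec_detect_ai_context_level_py (lines : List String) (cursor_context : String) (out : String) : Prop := out = detect_ai_context_level_py_alt lines cursor_context
instance (lines : List String) (cursor_context : String) (out : String) : Decidable (Spec_detect_ai_context_level_py lines cursor_context out) := by unfold Spec_detect_ai_context_level_py; infer_instance

-- ===== CLAIM (what is proved, stated in full; the proofs are below) =====
def Claim_equal_detect_ai_context_level_py : Prop := ∀ (lines : List String) (cursor_context : String), Dom_detect_ai_context_level_py lines cursor_context → Spec_detect_ai_context_level_py lines cursor_context (detect_ai_context_level_py lines cursor_context)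

-- ===== LEMMAS AND PROOFS =====

theorem split0_go_acc (s cur acc) :
    PySem.Chars.split₀.go s cur acc = acc.reverse ++ PySem.Chars.split₀.go s cur [] := by
  induction s generalizing cur acc with
  | nil =>
    simp only [PySem.Chars.split₀.go]
    by_cases h : cur.isEmpty <;> simp [h]
  | cons c rest ih =>
    simp only [PySem.Chars.split₀.go]
    by_cases hs : PySem.Chars.isspace c
    · by_cases h : cur.isEmpty
      · simp only [hs, h, if_true]
        exact ih [] acc
      · simp only [hs, h, if_true, if_false, Bool.false_eq_true]
        rw [ih [] (cur.reverse :: acc), ih [] [cur.reverse]]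
        simp
    · simp only [hs, Bool.false_eq_true, if_false]
      exact ih (c :: cur) acc

theorem split0_class (t : List Char) :
    PySem.Chars.split₀ ('c' :: 'l' :: 'a' :: 's' :: 's' :: ' ' :: t)
      = ['c','l','a','s','s'] :: PySem.Chars.split₀ t := by
  show PySem.Chars.split₀.go _ [] [] = _
  simp only [PySem.Chars.split₀.go,
    show PySem.Chars.isspace 'c' = false from by decide,
    show PySem.Chars.isspace 'l' = false from by decide,
    show PySem.Chars.isspace 'a' = false from by decide,
    show PySem.Chars.isspace 's' = false from by decide,
    show PySem.Chars.isspace ' ' = true from by decide,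
    Bool.false_eq_true, if_false, if_true, List.isEmpty_cons, List.isEmpty_nil]
  rw [split0_go_acc]
  rfl

theorem split0_def (t : List Char) :
    PySem.Chars.split₀ ('d' :: 'e' :: 'f' :: ' ' :: t)
      = ['d','e','f'] :: PySem.Chars.split₀ t := by
  show PySem.Chars.split₀.go _ [] [] = _
  simp only [PySem.Chars.split₀.go,
    show PySem.Chars.isspace 'd' = false from by decide,
    show PySem.Chars.isspace 'e' = false from by decide,
    show PySem.Chars.isspace 'f' = false from by decide,
    show PySem.Chars.isspace ' ' = true from by decide,
    Bool.false_eq_true, if_false, if_true, List.isEmpty_cons, List.isEmpty_nil]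
  rw [split0_go_acc]
  rfl

theorem split0_go_head (s : List Char) (cur : List Char) (h : cur ≠ []) :
    (PySem.Chars.split₀.go s cur []).getD 0 []
      = cur.reverse ++ s.takeWhile (fun c => !PySem.Chars.isspace c) := by
  induction s generalizing cur with
  | nil =>
    have hc : cur.isEmpty = false := by simpa using h
    simp [PySem.Chars.split₀.go, hc]
  | cons c rest ih =>
    simp only [PySem.Chars.split₀.go]
    by_cases hs : PySem.Chars.isspace c
    · have hc : cur.isEmpty = false := by simpa using h
      simp only [hs, if_true, hc, Bool.false_eq_true, if_false]
      rw [split0_go_acc]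
      simp [hs]
    · simp only [hs, Bool.false_eq_true, if_false]
      rw [ih (c :: cur) (by simp)]
      simp [hs]

theorem split0_head (s : List Char) :
    (PySem.Chars.split₀ s).getD 0 []
      = (s.dropWhile PySem.Chars.isspace).takeWhile (fun c => !PySem.Chars.isspace c) := by
  induction s with
  | nil => rfl
  | cons c rest ih =>
    show (PySem.Chars.split₀.go _ [] []).getD 0 [] = _
    simp only [PySem.Chars.split₀.go]
    by_cases hs : PySem.Chars.isspace c
    · simp only [hs, if_true, List.isEmpty_nil, List.dropWhile_cons, ih.symm]
      rfl
    · simp only [hs, Bool.false_eq_true, if_false, List.dropWhile_cons]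
      rw [split0_go_head rest [c] (by simp)]
      simp [hs]

theorem splitOn_go_acc (sep : List Char) (fuel : Nat) (l cur : List Char) (acc) :
    PySem.Chars.splitOn.go sep fuel l cur acc
      = acc.reverse ++ PySem.Chars.splitOn.go sep fuel l cur [] := by
  induction fuel generalizing l cur acc with
  | zero => cases l <;> simp [PySem.Chars.splitOn.go]
  | succ fuel ih =>
    cases l with
    | nil => simp [PySem.Chars.splitOn.go]
    | cons c rest =>
      simp only [PySem.Chars.splitOn.go]
      by_cases hp : sep.isPrefixOf (c :: rest)
      · simp only [hp, if_true]
        rw [ih _ [] (cur.reverse :: acc), ih _ [] [cur.reverse]]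
        simp
      · simp only [hp, Bool.false_eq_true, if_false]
        exact ih rest (c :: cur) acc

theorem splitOn_go_head (d : Char) (fuel : Nat) (l cur : List Char) (h : l.length ≤ fuel) :
    (PySem.Chars.splitOn.go [d] fuel l cur []).getD 0 []
      = cur.reverse ++ l.takeWhile (fun c => !(c == d)) := by
  induction fuel generalizing l cur with
  | zero =>
    have : l = [] := by cases l <;> simp_all
    subst this
    simp [PySem.Chars.splitOn.go]
  | succ fuel ih =>
    cases l with
    | nil => simp [PySem.Chars.splitOn.go]
    | cons c rest =>
      simp only [PySem.Chars.splitOn.go]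
      by_cases hp : [d].isPrefixOf (c :: rest)
      · have hd : c = d := by have h2 := hp; simp [List.isPrefixOf] at h2; exact h2.symm
        simp only [hp, if_true]
        rw [splitOn_go_acc]
        subst hd
        simp
      · have hd : (c == d) = false := by have h2 := hp; simp [List.isPrefixOf] at h2; exact beq_eq_false_iff_ne.mpr (Ne.symm h2)
        simp only [hp, Bool.false_eq_true, if_false]
        rw [ih rest (c :: cur) (by simpa using Nat.le_of_succ_le_succ h)]
        simp [hd]

theorem splitOn_head (s : List Char) (d : Char) :
    (PySem.Chars.splitOn s [d]).getD 0 [] = s.takeWhile (fun c => !(c == d)) := by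
  show (PySem.Chars.splitOn.go [d] (s.length + 1) s [] []).getD 0 [] = _
  rw [splitOn_go_head d (s.length + 1) s [] (by omega)]
  rfl

theorem toList_split0_getD (a : String) (i : Nat) :
    ((PySem.Str.split₀ a).getD i "").toList = (PySem.Chars.split₀ a.toList).getD i [] := by
  rw [← PySem.Str.split₀_map_toList]
  rw [List.getD_eq_getElem?_getD, List.getD_eq_getElem?_getD, List.getElem?_map]
  cases (PySem.Str.split₀ a)[i]? <;> rfl

theorem toList_splitColon_head (a : String) :
    ((((PySem.Str.split? a ":").getD []).getD 0 "")).toList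
      = a.toList.takeWhile (fun c => !(c == ':')) := by
  have h := PySem.Str.split?_map a ":"
  rw [show (":" : String).toList = [':'] from rfl] at h
  rw [show PySem.Chars.split? a.toList [':'] = some (PySem.Chars.splitOn a.toList [':']) from rfl] at h
  cases hs : PySem.Str.split? a ":" with
  | none => rw [hs] at h; simp at h
  | some L =>
    rw [hs] at h
    simp only [Option.map_some, Option.some.injEq] at h
    rw [← splitOn_head a.toList ':', ← h]
    simp only [Option.getD_some]
    rw [List.getD_eq_getElem?_getD, List.getD_eq_getElem?_getD, List.getElem?_map]
    cases L[0]? <;> rfl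

theorem toList_splitParen_head (a : String) :
    ((((PySem.Str.split? a "(").getD []).getD 0 "")).toList
      = a.toList.takeWhile (fun c => !(c == '(')) := by
  have h := PySem.Str.split?_map a "("
  rw [show ("(" : String).toList = ['('] from rfl] at h
  rw [show PySem.Chars.split? a.toList ['('] = some (PySem.Chars.splitOn a.toList ['(']) from rfl] at h
  cases hs : PySem.Str.split? a "(" with
  | none => rw [hs] at h; simp at h
  | some L =>
    rw [hs] at h
    simp only [Option.map_some, Option.some.injEq] at h
    rw [← splitOn_head a.toList '(', ← h]
    simp only [Option.getD_some]
    rw [List.getD_eq_getElem?_getD, List.getD_eq_getElem?_getD, List.getElem?_map]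
    cases L[0]? <;> rfl

theorem ctrl_find (s : String) (kws : List (String × String)) (h : ∀ p ∈ kws, p.2 = "ctrl") :
    ((kws.find? (fun p => PySem.Str.startswith s p.1)).map (·.2))
      = if kws.any (fun p => PySem.Str.startswith s p.1) then some "ctrl" else none := by
  induction kws with
  | nil => rfl
  | cons p rest ih =>
    rw [List.find?, List.any_cons]
    by_cases hp : PySem.Chars.startswith s.toList p.1.toList
    · simp [PySem.Str.startswith_eq, hp, h p (by simp)]
    · simp only [PySem.Str.startswith_eq, hp, Bool.false_or]
      simp only [← PySem.Str.startswith_eq]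
      exact ih (fun q hq => h q (by simp [hq]))

theorem kind_of_cases (s : String) :
    detect_kind_of s =
      if PySem.Str.startswith s "class " then some "class"
      else if PySem.Str.startswith s "def " then some "def"
      else if ["if ", "elif ", "else:", "for ", "while ", "try:", "except", "finally:", "with "].any
          (fun keyword => PySem.Str.startswith s keyword) then some "ctrl"
      else none := by
  unfold detect_kind_of pvPrefixTable
  rw [List.find?, List.find?]
  by_cases h1 : PySem.Chars.startswith s.toList ['c','l','a','s','s',' ']
  · simp [PySem.Str.startswith_eq, show ("class " : String).toList = ['c','l','a','s','s',' '] from rfl, h1]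
  · by_cases h2 : PySem.Chars.startswith s.toList ['d','e','f',' ']
    · simp [PySem.Str.startswith_eq, show ("class " : String).toList = ['c','l','a','s','s',' '] from rfl,
        show ("def " : String).toList = ['d','e','f',' '] from rfl, h1, h2]
    · simp only [PySem.Str.startswith_eq, show ("class " : String).toList = ['c','l','a','s','s',' '] from rfl,
        show ("def " : String).toList = ['d','e','f',' '] from rfl, h1, h2, Bool.false_eq_true, if_false]
      simp only [← PySem.Str.startswith_eq]
      rw [ctrl_find s _ (by intro p hp; fin_cases hp <;> rfl)]
      simp [List.any_cons, PySem.Str.startswith_eq]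

theorem class_name_eq (line : String) (hc : PySem.Str.startswith line "class " = true) :
    (((PySem.Str.split? (((PySem.Str.split? ((PySem.Str.split₀ line).getD 1 "") "(").getD []).getD 0 "") ":").getD []).getD 0 "")
      = detect_word_after line 6 ['(', ':'] := by
  apply String.ext
  rw [toList_splitColon_head, toList_splitParen_head, toList_split0_getD]
  rw [PySem.Str.startswith_eq] at hc
  obtain ⟨t, ht⟩ := (PySem.Chars.startswith_iff _ _).mp hc
  have htl : line.toList = 'c' :: 'l' :: 'a' :: 's' :: 's' :: ' ' :: t := by
    rw [← ht]; rfl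
  rw [htl, split0_class, List.getD_cons_succ, split0_head,
    List.takeWhile_takeWhile, List.takeWhile_takeWhile]
  unfold detect_word_after
  rw [show (∀ (l : List Char), (String.ofList l).toList = l) from fun l => Eq.symm (String.ofList_eq.mp rfl), htl]
  show List.takeWhile _ (t.dropWhile PySem.Chars.isspace)
      = List.takeWhile _ ((List.drop 6 ('c'::'l'::'a'::'s'::'s'::' '::t)).dropWhile PySem.Chars.isspace)
  rw [show List.drop 6 ('c'::'l'::'a'::'s'::'s'::' '::t) = t from rfl]
  congr 1
  funext c
  by_cases h1 : PySem.Chars.isspace c <;> by_cases h2 : c = '(' <;> by_cases h3 : c = ':' <;>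
    simp [h1, h2, h3]

theorem def_name_eq (line : String) (hd : PySem.Str.startswith line "def " = true) :
    (((PySem.Str.split? ((PySem.Str.split₀ line).getD 1 "") "(").getD []).getD 0 "")
      = detect_word_after line 4 ['('] := by
  apply String.ext
  rw [toList_splitParen_head, toList_split0_getD]
  rw [PySem.Str.startswith_eq] at hd
  obtain ⟨t, ht⟩ := (PySem.Chars.startswith_iff _ _).mp hd
  have htl : line.toList = 'd' :: 'e' :: 'f' :: ' ' :: t := by rw [← ht]; rfl
  rw [htl, split0_def, List.getD_cons_succ, split0_head, List.takeWhile_takeWhile]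
  unfold detect_word_after
  rw [show (∀ (l : List Char), (String.ofList l).toList = l) from fun l => Eq.symm (String.ofList_eq.mp rfl), htl]
  show List.takeWhile _ (t.dropWhile PySem.Chars.isspace)
      = List.takeWhile _ ((List.drop 4 ('d'::'e'::'f'::' '::t)).dropWhile PySem.Chars.isspace)
  rw [show List.drop 4 ('d'::'e'::'f'::' '::t) = t from rfl]
  congr 1
  funext c
  by_cases h1 : PySem.Chars.isspace c <;> by_cases h2 : c = '(' <;> simp [h1, h2]

theorem header_eq (line : String) :
    PySem.Str.strip (((PySem.Str.split? line ":").getD []).getD 0 "") = detect_header line := by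
  unfold detect_header
  congr 1
  apply String.ext
  rw [toList_splitColon_head, show (∀ (l : List Char), (String.ofList l).toList = l) from fun l => Eq.symm (String.ofList_eq.mp rfl)]

theorem no_kw_of_blank (line : String) (h0 : (line == "" || PySem.Str.startswith line "#") = true) :
    detect_kind_of line = none := by
  rw [kind_of_cases]
  rcases Bool.or_eq_true_iff.mp h0 with he | hh
  · have : line = "" := by simpa using he
    subst this
    decide
  · rw [PySem.Str.startswith_eq] at hh
    obtain ⟨t, ht⟩ := (PySem.Chars.startswith_iff _ _).mp hh
    have htl : line.toList = '#' :: t := by rw [← ht]; rfl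
    simp [PySem.Str.startswith_eq, PySem.Chars.startswith, List.isPrefixOf, htl]

theorem step_pointwise (line r : String) :
    (if line == "" || PySem.Str.startswith line "#" then r
     else if PySem.Str.startswith line "class " then
       "inside class '" ++
         (((PySem.Str.split? (((PySem.Str.split? ((PySem.Str.split₀ line).getD 1 "") "(").getD []).getD 0 "") ":").getD []).getD 0 "")
         ++ "'"
     else if PySem.Str.startswith line "def " then
       "inside function '" ++
         (((PySem.Str.split? ((PySem.Str.split₀ line).getD 1 "") "(").getD []).getD 0 "") ++ "'"
     else if ["if ", "elif ", "else:", "for ", "while ", "try:", "except", "finally:", "with "].any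
         (fun keyword => PySem.Str.startswith line keyword) then
       "inside control structure '" ++ PySem.Str.strip (((PySem.Str.split? line ":").getD []).getD 0 "") ++ "'"
     else r)
    = match detect_kind_of line with
      | some kind => detect_render (some (kind, line))
      | none => r := by
  by_cases h0 : (line == "" || PySem.Str.startswith line "#") = true
  · rw [if_pos h0, no_kw_of_blank line h0]
  · rw [if_neg h0, kind_of_cases]
    by_cases h1 : PySem.Str.startswith line "class "
    · rw [if_pos h1, if_pos h1]
      simp only [detect_render, class_name_eq line h1]
      rfl
    · rw [if_neg h1, if_neg h1]
      by_cases h2 : PySem.Str.startswith line "def "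
      · rw [if_pos h2, if_pos h2]
        simp only [detect_render, def_name_eq line h2]
        rfl
      · rw [if_neg h2, if_neg h2]
        by_cases h3 : (["if ", "elif ", "else:", "for ", "while ", "try:", "except", "finally:", "with "].any
            (fun keyword => PySem.Str.startswith line keyword)) = true
        · rw [if_pos h3, if_pos h3]
          simp only [detect_render, header_eq line]
          rfl
        · rw [if_neg h3, if_neg h3]


theorem go_eq_foldr (xs : List String) :
    detect_ai_context_level_py_go xs =
      xs.foldr (fun raw r =>
        match detect_kind_of (PySem.Str.strip raw) with
        | some kind => detect_render (some (kind, PySem.Str.strip raw))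
        | none => r) "module level" := by
  induction xs with
  | nil => rfl
  | cons l rest ih =>
    rw [List.foldr_cons, ← ih]
    simp only [detect_ai_context_level_py_go]
    exact step_pointwise (PySem.Str.strip l) (detect_ai_context_level_py_go rest)

theorem render_foldl (xs : List String) (acc : Option (String × String)) :
    detect_render (xs.foldl (fun found raw =>
        let s := PySem.Str.strip raw
        match detect_kind_of s with
        | some kind => some (kind, s)
        | none => found) acc)
      = xs.foldl (fun r raw =>
          match detect_kind_of (PySem.Str.strip raw) with
          | some kind => detect_render (some (kind, PySem.Str.strip raw))
          | none => r) (detect_render acc) := by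
  induction xs generalizing acc with
  | nil => rfl
  | cons raw rest ih =>
    rw [List.foldl_cons, List.foldl_cons, ih]
    cases hk : detect_kind_of (PySem.Str.strip raw) <;> simp [hk]

-- ===== VERDICT (by name: the statement is the Claim_ definition above) =====
theorem detect_ai_context_level_py_spec : Claim_equal_detect_ai_context_level_py := by
  intro lines cursor_context _
  unfold Spec_detect_ai_context_level_py detect_ai_context_level_py detect_ai_context_level_py_alt
  rw [go_eq_foldr, List.foldr_reverse, render_foldl]
  rfl
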